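-- pv_equiv track=rewrite | github.com/fzm121516/LLaVA-NeXT | lokitest.py | process_true_or_false_data
-- ===== SOURCE A (Python) =====
-- def process_true_or_false_data(data):
--     """处理true_or_false数据：去重并根据question_type强制设置answer"""
--     # 1. 去重 - 保留每个video_path第一次出现的条目
--     seen_paths = set()
--     unique_data = []
--
--     for item in data:
--         if "video_path" not in item:
--             continue
--         path = item["video_path"]
--         if path not in seen_paths:
--             seen_paths.add(path)
--             unique_data.append(item)
--
--     # 2. 根据question_type强制设置answer
--     processed_data = []
--     for item in unique_data:
--         if "question_type" not in item:
--             processed_data.append(item)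
--             continue
--
--         question_type = item["question_type"]
--         parts = question_type.split("_")
--         if len(parts) >= 6:  # 确保有足够的部分
--             real_fake = parts[3]  # 第三个_后的词
--             new_item = item.copy()
--             if real_fake.lower() == "real":
--                 new_item["answer"] = "Yes"
--             elif real_fake.lower() == "fake":
--                 new_item["answer"] = "No"
--             processed_data.append(new_item)
--         else:
--             processed_data.append(item)
--
--     return processed_data
-- ===== SOURCE B (Python) =====
-- def _fix(item):
--     parts = item.get("question_type", "").split("_")
--     if len(parts) < 6:
--         return item
--     out = dict(item)
--     w = parts[3].lower()
--     if w == "real":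
--         out["answer"] = "Yes"
--     elif w == "fake":
--         out["answer"] = "No"
--     return out
--
-- def process_true_or_false_data(data):
--     # filtering-nub: repeatedly take the first pending item and purge its
--     # video_path from the rest -- no auxiliary seen-set is ever built
--     result = []
--     pending = [it for it in data if "video_path" in it]
--     while pending:
--         head = pending[0]
--         p = head["video_path"]
--         result.append(_fix(head))
--         pending = [it for it in pending[1:] if it["video_path"] != p]
--     return result
-- ===== Notes on version B (the rewrite author's own statement) =====
-- stated objective: alternative
-- what changed: Replaces the seen-set dedup pass plus second rewriting pass by a filtering-nub worklist: repeatedly emit the (answer-fixed) first pending item and filter every later item with the same video_path out of the worklist, so no seen-set and no intermediate unique_data list exist.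
import Mathlib
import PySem

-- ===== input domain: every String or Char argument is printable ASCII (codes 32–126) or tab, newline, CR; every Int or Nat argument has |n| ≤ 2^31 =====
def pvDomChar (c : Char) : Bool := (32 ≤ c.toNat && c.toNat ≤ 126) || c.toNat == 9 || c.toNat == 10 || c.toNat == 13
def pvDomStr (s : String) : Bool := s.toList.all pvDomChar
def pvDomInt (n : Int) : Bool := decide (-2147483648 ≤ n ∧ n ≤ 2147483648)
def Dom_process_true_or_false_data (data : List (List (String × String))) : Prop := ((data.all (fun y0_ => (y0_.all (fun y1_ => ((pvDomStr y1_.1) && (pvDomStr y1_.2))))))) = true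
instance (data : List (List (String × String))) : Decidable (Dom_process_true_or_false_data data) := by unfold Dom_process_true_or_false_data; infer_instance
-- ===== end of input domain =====

-- B replaces A's seen-set dedup pass + second rewriting pass by a filtering-nub worklist
-- (emit the answer-fixed first pending item, purge its video_path from the rest); same return value.


-- assoc-list primitives for the Python dicts (items are dicts; lookup = first match,
-- assignment overwrites the first matching key in place, else appends — dict semantics)
def alGet : List (String × String) → String → Option String
  | [], _ => none
  | p :: rest, k => if p.1 == k then some p.2 else alGet rest k

def alSet : List (String × String) → String → String → List (String × String)
  | [], k, v => [(k, v)]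
  | p :: rest, k, v => if p.1 == k then (k, v) :: rest else p :: alSet rest k v

-- ===== PORT A =====
def process_true_or_false_data (data : List (List (String × String))) : List (List (String × String)) :=
  -- pass 1: dedup by video_path, first occurrence kept
  let st := data.foldl
    (fun (st : PySem.Set String × List (List (String × String))) item =>
      match alGet item "video_path" with
      | none => st
      | some path => if st.1.contains path then st else (st.1.add path, st.2 ++ [item]))
    (PySem.Set.empty, [])
  -- pass 2: force answer from question_type
  st.2.foldl
    (fun acc item =>
      match alGet item "question_type" with
      | none => acc ++ [item]
      | some question_type =>
        let parts := (PySem.Str.split? question_type "_").getD []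
        if 6 ≤ parts.length then
          let real_fake := PySem.List.pyGetD parts 3 ""
          let new_item := item   -- item.copy()
          let new_item :=
            if PySem.Str.lower real_fake == "real" then alSet new_item "answer" "Yes"
            else if PySem.Str.lower real_fake == "fake" then alSet new_item "answer" "No"
            else new_item
          acc ++ [new_item]
        else acc ++ [item])
    []

-- ===== PORT B =====
def pvFix (item : List (String × String)) : List (String × String) :=
  let parts := (PySem.Str.split? ((alGet item "question_type").getD "") "_").getD []
  if parts.length < 6 then item
  else
    -- dict(item) is a copy, equal as a value to item
    let w := PySem.Str.lower (PySem.List.pyGetD parts 3 "")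
    if w == "real" then alSet item "answer" "Yes"
    else if w == "fake" then alSet item "answer" "No"
    else item

-- Source B's while-loop over the pending worklist (every pending item has a video_path,
-- so the getD "" default of the lookup is never used)
def pvNub (pending : List (List (String × String))) : List (List (String × String)) :=
  match pending with
  | [] => []
  | head :: tail =>
    let p := (alGet head "video_path").getD ""
    pvFix head :: pvNub (tail.filter (fun it => (alGet it "video_path").getD "" != p))
termination_by pending.length
decreasing_by simpa using Nat.lt_succ_of_le (List.length_filter_le _ _)

def process_true_or_false_data_alt (data : List (List (String × String))) : List (List (String × String)) :=
  pvNub (data.filter (fun it => (alGet it "video_path").isSome))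

-- ===== PRECONDITION & SPEC =====
def Spec_process_true_or_false_data (data : List (List (String × String))) (out : List (List (String × String))) : Prop := out = process_true_or_false_data_alt data
instance (data : List (List (String × String))) (out : List (List (String × String))) : Decidable (Spec_process_true_or_false_data data out) := by unfold Spec_process_true_or_false_data; infer_instance

-- ===== CLAIM =====
def Claim_equal_process_true_or_false_data : Prop := ∀ (data : List (List (String × String))), Dom_process_true_or_false_data data → Spec_process_true_or_false_data data (process_true_or_false_data data)

-- ===== LEMMAS AND PROOFS =====

-- proof-only names for A's two loop bodies (definitionally the port's lambdas)
def stepDedup (st : PySem.Set String × List (List (String × String)))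
    (item : List (String × String)) : PySem.Set String × List (List (String × String)) :=
  match alGet item "video_path" with
  | none => st
  | some path => if st.1.contains path then st else (st.1.add path, st.2 ++ [item])

def stepAnswer (acc : List (List (String × String))) (item : List (String × String)) :
    List (List (String × String)) :=
  match alGet item "question_type" with
  | none => acc ++ [item]
  | some question_type =>
    if 6 ≤ ((PySem.Str.split? question_type "_").getD []).length then
      acc ++ [if PySem.Str.lower (PySem.List.pyGetD ((PySem.Str.split? question_type "_").getD []) 3 "") == "real"
                then alSet item "answer" "Yes"
              else if PySem.Str.lower (PySem.List.pyGetD ((PySem.Str.split? question_type "_").getD []) 3 "") == "fake"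
                then alSet item "answer" "No"
              else item]
    else acc ++ [item]

-- Source B's _fix returns the item unchanged when question_type is missing
lemma pvFix_none (item : List (String × String)) (h : alGet item "question_type" = none) :
    pvFix item = item := by
  have hsplit : (PySem.Str.split? "" "_").getD [] = [""] := by decide
  unfold pvFix
  rw [h]
  simp only [Option.getD_none, hsplit]
  norm_num

-- A's second-pass loop body appends exactly pvFix item
lemma stepAnswer_eq (acc : List (List (String × String))) (item : List (String × String)) :
    stepAnswer acc item = acc ++ [pvFix item] := by
  unfold stepAnswer
  cases h : alGet item "question_type" with
  | none => rw [pvFix_none item h]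
  | some qt =>
    show (if 6 ≤ ((PySem.Str.split? qt "_").getD []).length then
        acc ++ [if PySem.Str.lower (PySem.List.pyGetD ((PySem.Str.split? qt "_").getD []) 3 "") == "real"
                  then alSet item "answer" "Yes"
                else if PySem.Str.lower (PySem.List.pyGetD ((PySem.Str.split? qt "_").getD []) 3 "") == "fake"
                  then alSet item "answer" "No"
                else item]
      else acc ++ [item]) = acc ++ [pvFix item]
    simp only [pvFix, h, Option.getD_some]
    generalize (PySem.Str.split? qt "_").getD [] = parts
    by_cases h6 : 6 ≤ parts.length
    · rw [if_pos h6, if_neg (show ¬ parts.length < 6 by omega)]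
    · rw [if_neg h6, if_pos (show parts.length < 6 by omega)]

-- A's second pass is map pvFix
lemma pass2_eq (u : List (List (String × String))) (acc : List (List (String × String))) :
    u.foldl stepAnswer acc = acc ++ u.map pvFix := by
  induction u generalizing acc with
  | nil => simp
  | cons x xs ih =>
    simp only [List.foldl_cons, List.map_cons]
    rw [stepAnswer_eq acc x, ih (acc ++ [pvFix x])]
    simp

-- functional form of A's first pass, used only by the proofs
def dedupF (s : PySem.Set String) : List (List (String × String)) → List (List (String × String))
  | [] => []
  | it :: rest =>
    match alGet it "video_path" with
    | none => dedupF s rest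
    | some p => if s.contains p then dedupF s rest else it :: dedupF (s.add p) rest

lemma pass1_eq (L : List (List (String × String))) (s : PySem.Set String)
    (u : List (List (String × String))) :
    (L.foldl stepDedup (s, u)).2 = u ++ dedupF s L := by
  induction L generalizing s u with
  | nil => simp [dedupF]
  | cons it rest ih =>
    simp only [List.foldl_cons, stepDedup, dedupF]
    cases h : alGet it "video_path" with
    | none => exact ih s u
    | some p =>
      simp only
      by_cases hc : s.contains p = true
      · rw [if_pos hc, if_pos hc]; exact ih s u
      · rw [if_neg hc, if_neg hc]
        rw [ih (s.add p) (u ++ [it])]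
        simp

-- the items that pass 1 with seen-set s can still keep
def keepPred (s : PySem.Set String) (it : List (String × String)) : Bool :=
  match alGet it "video_path" with
  | none => false
  | some q => !s.contains q

lemma setContains_iff (s : PySem.Set String) (q : String) :
    s.contains q = true ↔ q ∈ s := by
  simp [PySem.Set.contains]

lemma keepPred_add (s : PySem.Set String) (p : String) (it : List (String × String)) :
    keepPred (s.add p) it
      = (((alGet it "video_path").getD "" != p) && keepPred s it) := by
  unfold keepPred
  cases h : alGet it "video_path" with
  | none => simp
  | some q =>
    simp only [Option.getD_some]
    by_cases hq : q = p
    · subst hq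
      have hc1 : (s.add q).contains q = true := by
        rw [setContains_iff]
        unfold PySem.Set.add
        by_cases hm : q ∈ s
        · simp [hm]
        · simp [hm]
      simp [hc1]
    · have hadd : (s.add p).contains q = s.contains q := by
        unfold PySem.Set.add
        by_cases hm : p ∈ s
        · simp [hm]
        · simp [hm, PySem.Set.contains, hq]
      have hbne : (q != p) = true := by simp [hq]
      rw [hadd, hbne]
      simp

lemma dedupF_cons_none (s : PySem.Set String) (it : List (String × String))
    (rest : List (List (String × String))) (h : alGet it "video_path" = none) :
    dedupF s (it :: rest) = dedupF s rest := by
  simp [dedupF, h]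

lemma dedupF_cons_some (s : PySem.Set String) (p : String) (it : List (String × String))
    (rest : List (List (String × String))) (h : alGet it "video_path" = some p) :
    dedupF s (it :: rest)
      = if s.contains p then dedupF s rest else it :: dedupF (s.add p) rest := by
  simp [dedupF, h]

-- the filtering-nub computes map pvFix of A's first pass
lemma nub_eq (L : List (List (String × String))) (s : PySem.Set String) :
    (dedupF s L).map pvFix = pvNub (L.filter (keepPred s)) := by
  induction hL : L.length using Nat.strong_induction_on generalizing L s with
  | _ n ih =>
    cases L with
    | nil => subst hL; simp [dedupF, pvNub]
    | cons it rest =>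
      subst hL
      cases h : alGet it "video_path" with
      | none =>
        have hk : keepPred s it = false := by simp [keepPred, h]
        rw [dedupF_cons_none s it rest h, List.filter_cons, hk]
        simp only [Bool.false_eq_true, if_neg (by simp : ¬ (false = true))]
        exact ih rest.length (by simp) rest s rfl
      | some p =>
        rw [dedupF_cons_some s p it rest h, List.filter_cons]
        by_cases hc : s.contains p = true
        · have hk : keepPred s it = false := by
            simp only [keepPred, h]
            simpa using (setContains_iff s p).mp hc
          rw [if_pos hc, hk]
          simp only [Bool.false_eq_true, if_neg (by simp : ¬ (false = true))]
          exact ih rest.length (by simp) rest s rfl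
        · have hk : keepPred s it = true := by
            simp only [keepPred, h]
            simpa using fun hm => hc ((setContains_iff s p).mpr hm)
          rw [if_neg hc, hk, if_pos rfl]
          rw [pvNub]
          simp only [List.map_cons, h, Option.getD_some]
          congr 1
          rw [ih rest.length (by simp) rest (s.add p) rfl]
          congr 1
          rw [List.filter_filter]
          apply List.filter_congr
          intro x _
          rw [keepPred_add]

lemma keepPred_empty (it : List (String × String)) :
    keepPred PySem.Set.empty it = (alGet it "video_path").isSome := by
  unfold keepPred
  cases h : alGet it "video_path" with
  | none => simp
  | some q => simp [PySem.Set.empty, PySem.Set.contains]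

lemma main_eq (data : List (List (String × String))) :
    process_true_or_false_data data = process_true_or_false_data_alt data := by
  show (((data.foldl stepDedup (PySem.Set.empty, [])).2).foldl stepAnswer []) = _
  rw [pass2_eq, pass1_eq]
  simp only [List.nil_append]
  rw [nub_eq]
  unfold process_true_or_false_data_alt
  congr 1
  exact List.filter_congr (fun x _ => keepPred_empty x)

-- ===== VERDICT =====
theorem process_true_or_false_data_spec : Claim_equal_process_true_or_false_data := by
  intro data _
  exact main_eq data
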